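-- pv_equiv track=rewrite | github.com/payel-bhunia/pythonProgramming | Q_problem/perfect_Num.py | solve
-- ===== SOURCE A (Python) =====
-- from collections import deque
--
-- def solve(A):
--     deq = deque(['1','2'])
--     ans = []
--     count = 0
--     while count < A:
--         ele = deq[0]
--         ans.append(ele+ele[::-1])
--         count += 1
--         if count == A:
--             return ele
--         else:
--             deq.append(ele + '1')
--             deq.append(ele + '2')
--             deq.popleft()
-- ===== SOURCE B (Python) =====
-- def solve(A):
--     # A-th string over digits {1,2} in length-then-lex order = bijective base-2 of A.
--     s = ''
--     a = A
--     while a > 0: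
--         r = a % 2
--         if r == 0:
--             r = 2
--         s = str(r) + s
--         a = (a - r) // 2
--     return s
-- ===== Notes on version B (the rewrite author's own statement) =====
-- stated objective: faster
-- what changed: Replaces the BFS queue that enumerates all A strings with a direct computation of the bijective base-2 representation of A.
-- outside the precondition, e.g. on solve(0): A returns None, B returns ''
import Mathlib
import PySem

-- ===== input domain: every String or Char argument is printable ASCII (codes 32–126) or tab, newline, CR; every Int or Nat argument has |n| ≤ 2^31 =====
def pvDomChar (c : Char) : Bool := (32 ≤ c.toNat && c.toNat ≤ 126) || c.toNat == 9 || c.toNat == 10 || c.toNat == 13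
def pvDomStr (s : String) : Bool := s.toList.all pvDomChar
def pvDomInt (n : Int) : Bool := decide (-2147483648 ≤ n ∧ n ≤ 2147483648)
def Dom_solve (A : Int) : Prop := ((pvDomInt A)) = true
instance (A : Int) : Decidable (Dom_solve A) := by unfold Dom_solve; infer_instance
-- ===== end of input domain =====

-- B replaces A's BFS queue enumeration of all A strings by directly computing the
-- bijective base-2 representation of A (objective: faster).

-- ===== PORT A =====
-- A's while loop: state (deq, ans, count). The deque is represented as the standard
-- front/back pair (front ++ back.reverse), giving the O(1)-amortized ends of
-- collections.deque; ans is write-only in A, accumulated here by consing (never read).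
-- deq[0] on an empty deque would raise (the unreachable none branch); the loop falling
-- through returns None (none). The Nat argument is fuel making the recursion structural;
-- solve passes A.toNat, enough for the loop's at most A iterations.
def solveLoop (A : Int) (front back ansRev : List (List Char)) (count : Int) :
    Nat → Option (List Char)
  | 0 => none
  | fuel + 1 =>
    if count < A then
      match front with
      | ele :: rest =>
        let ansRev' := (ele ++ ele.reverse) :: ansRev
        let count' := count + 1
        if count' = A then some ele
        else solveLoop A rest ((ele ++ ['2']) :: (ele ++ ['1']) :: back) ansRev' count' fuel
      | [] =>
        match back.reverse with
        | [] => none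
        | ele :: rest =>
          let ansRev' := (ele ++ ele.reverse) :: ansRev
          let count' := count + 1
          if count' = A then some ele
          else solveLoop A rest [ele ++ ['2'], ele ++ ['1']] ansRev' count' fuel
    else none

def solve (A : Int) : String :=
  match solveLoop A [['1'], ['2']] [] [] 0 A.toNat with
  | some s => String.ofList s
  | none => ""    -- Python returns None here; excluded by Pre_solve

-- ===== PORT B =====
-- Source B's `while a > 0` loop, s built by prepending the digit character; the Nat
-- argument is fuel making the recursion structural (a shrinks each step, so a.toNat
-- steps suffice).
def solveAltLoop : Nat → Int → List Char → List Char
  | 0, _, s => s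
  | fuel + 1, a, s =>
    if 0 < a then
      let r0 := PySem.Int.mod a 2
      let r := if r0 = 0 then 2 else r0
      solveAltLoop fuel (PySem.Int.floordiv (a - r) 2) ((if r = 1 then '1' else '2') :: s)
    else s

def solve_alt (A : Int) : String := String.ofList (solveAltLoop A.toNat A [])

-- ===== PRECONDITION & SPEC =====
-- Pre_ excludes A ≤ 0: there the Python A returns None, which is not a string.
def Pre_solve (A : Int) : Prop := 1 ≤ A
instance (A : Int) : Decidable (Pre_solve A) := by unfold Pre_solve; infer_instance
def pvWitness_solve : Int := (5)
def Spec_solve (A : Int) (out : String) : Prop := out = solve_alt A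
instance (A : Int) (out : String) : Decidable (Spec_solve A out) := by unfold Spec_solve; infer_instance

-- ===== CLAIM (what is proved, stated in full; the proofs are below) =====
def Claim_equal_solve : Prop := ∀ (A : Int), Dom_solve A → Pre_solve A → Spec_solve A (solve A)

-- ===== LEMMAS AND PROOFS =====

-- the bijective base-2 numeral of n over digits {'1','2'}
def rep (n : Nat) : List Char :=
  if n = 0 then [] else rep ((n - 1) / 2) ++ [if n % 2 = 1 then '1' else '2']
termination_by n
decreasing_by omega

theorem rep_child1 (n : Nat) : rep (2 * n + 1) = rep n ++ ['1'] := by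
  rw [rep]
  have h1 : (2 * n + 1 - 1) / 2 = n := by omega
  have h2 : (2 * n + 1) % 2 = 1 := by omega
  simp only [h1, h2]
  simp

theorem rep_child2 (n : Nat) : rep (2 * n + 2) = rep n ++ ['2'] := by
  rw [rep]
  have h1 : (2 * n + 2 - 1) / 2 = n := by omega
  have h2 : (2 * n + 2) % 2 = 0 := by omega
  simp only [h1, h2]
  simp

-- B's loop computes rep whenever it has fuel ≥ a.toNat
theorem solveAltLoop_eq (fuel : Nat) : ∀ (a : Int) (s : List Char), a.toNat ≤ fuel →
    solveAltLoop fuel a s = rep a.toNat ++ s := by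
  induction fuel with
  | zero =>
    intro a s h
    have h0 : a.toNat = 0 := by omega
    simp [solveAltLoop, h0, rep]
  | succ n ih =>
    intro a s h
    by_cases hpos : 0 < a
    · rw [solveAltLoop]
      have hm : PySem.Int.mod a 2 = a % 2 := PySem.Int.mod_eq_emod_of_pos (by omega)
      have hd : ∀ x : Int, PySem.Int.floordiv x 2 = x / 2 := fun x =>
        PySem.Int.floordiv_eq_ediv_of_pos (by omega)
      simp only [hpos, if_true, hm, hd]
      have he := Int.emod_two_eq a
      by_cases hpar : a % 2 = 0
      · obtain ⟨m, hmeq⟩ : ∃ m : Nat, a = 2 * (m : Int) + 2 := ⟨((a - 2) / 2).toNat, by omega⟩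
        have h3 : a.toNat = 2 * m + 2 := by omega
        rw [if_pos hpar]
        norm_num
        rw [show a - 2 = 2 * (m : Int) by omega,
          show (2 * (m : Int)) / 2 = (m : Int) by omega]
        rw [ih _ _ (by omega)]
        rw [h3, rep_child2]
        simp
      · have hone : a % 2 = 1 := by omega
        obtain ⟨m, hmeq⟩ : ∃ m : Nat, a = 2 * (m : Int) + 1 := ⟨((a - 1) / 2).toNat, by omega⟩
        have h3 : a.toNat = 2 * m + 1 := by omega
        simp only [hone]
        norm_num
        rw [show a - 1 = 2 * (m : Int) by omega,
          show (2 * (m : Int)) / 2 = (m : Int) by omega]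
        rw [ih _ _ (by omega)]
        rw [h3, rep_child1]
        simp
    · have h0 : a.toNat = 0 := by omega
      rw [solveAltLoop]
      simp [hpos, h0, rep]

-- single-list model of A's loop (proof-side only; ans dropped, it is never read)
def solveLoopL (A : Int) (deq : List (List Char)) (count : Int) : Nat → Option (List Char)
  | 0 => none
  | fuel + 1 =>
    if count < A then
      match deq with
      | [] => none
      | ele :: rest =>
        if count + 1 = A then some ele
        else solveLoopL A (rest ++ [ele ++ ['1'], ele ++ ['2']]) (count + 1) fuel
    else none

-- the two-list queue port equals the single-list model on front ++ back.reverse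
theorem solveLoop_eq_model (fuel : Nat) :
    ∀ (A : Int) (front back ansRev : List (List Char)) (count : Int),
    solveLoop A front back ansRev count fuel
      = solveLoopL A (front ++ back.reverse) count fuel := by
  induction fuel with
  | zero => intro A front back ansRev count; rfl
  | succ n ih =>
    intro A front back ansRev count
    rw [solveLoop.eq_def, solveLoopL.eq_def]
    by_cases hlt : count < A
    · simp only [hlt, if_true]
      match front with
      | ele :: rest =>
        simp only [List.cons_append]
        by_cases hend : count + 1 = A
        · simp [hend]
        · simp only [hend, if_false, ih]
          simp [List.append_assoc]
      | [] =>
        simp only [List.nil_append]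
        match hb : back.reverse with
        | [] => simp
        | ele :: rest =>
          by_cases hend : count + 1 = A
          · simp [hend]
          · simp only [hend, if_false, ih]
            simp
    · simp [hlt]

-- A's loop invariant: at count = k (0 ≤ k < A) the queue holds rep (k+1) … rep (2k+2),
-- and with fuel ≥ A - count the loop returns rep A
theorem solveLoopL_inv (fuel : Nat) : ∀ (A count : Int),
    0 ≤ count → count < A → (A - count).toNat ≤ fuel →
    solveLoopL A ((List.range' (count.toNat + 1) (count.toNat + 2)).map rep) count fuel
      = some (rep A.toNat) := by
  induction fuel with
  | zero => intro A count h0 hlt hf; omega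
  | succ n ih =>
    intro A count h0 hlt hf
    rw [solveLoopL.eq_def]
    rw [List.range'_succ, List.map_cons]
    simp only [hlt, if_true]
    by_cases hend : count + 1 = A
    · have : A.toNat = count.toNat + 1 := by omega
      simp [hend, this]
    · simp only [hend, if_false]
      have h1 : (count + 1).toNat = count.toNat + 1 := by omega
      have hsplit : List.range' (count.toNat + 2) (count.toNat + 3)
          = List.range' (count.toNat + 2) (count.toNat + 1)
            ++ [2 * count.toNat + 3, 2 * count.toNat + 4] := by
        have h := @List.range'_append (count.toNat + 2) (count.toNat + 1) 2 1
        rw [show count.toNat + 3 = count.toNat + 1 + 2 by omega, ← h]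
        rw [show count.toNat + 2 + 1 * (count.toNat + 1) = 2 * count.toNat + 3 by omega]
        simp [List.range']
      have hdeq : List.map rep (List.range' (count.toNat + 1 + 1) (count.toNat + 1)) ++
          [rep (count.toNat + 1) ++ ['1'], rep (count.toNat + 1) ++ ['2']]
          = List.map rep (List.range' ((count + 1).toNat + 1) ((count + 1).toNat + 2)) := by
        rw [h1,
          show count.toNat + 1 + 1 = count.toNat + 2 by omega,
          show count.toNat + 1 + 2 = count.toNat + 3 by omega,
          hsplit, List.map_append,
          show 2 * count.toNat + 3 = 2 * (count.toNat + 1) + 1 by omega,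
          show 2 * count.toNat + 4 = 2 * (count.toNat + 1) + 2 by omega]
        simp [rep_child1, rep_child2]
      rw [hdeq]
      exact ih A (count + 1) (by omega) (by omega) (by omega)

theorem rep_one : rep 1 = ['1'] := by rw [rep]; simp [rep]
theorem rep_two : rep 2 = ['2'] := by rw [rep]; simp [rep]

-- ===== VERDICT (by name: the statement is the Claim_ definition above) =====
theorem solve_spec : Claim_equal_solve := by
  intro A _hdom hpre
  unfold Spec_solve solve solve_alt
  have hinit : [['1'], ['2']] = (List.range' ((0:Int).toNat + 1) ((0:Int).toNat + 2)).map rep := by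
    simp [List.range', rep_one, rep_two]
  rw [solveLoop_eq_model]
  simp only [List.reverse_nil, List.append_nil]
  rw [hinit, solveLoopL_inv A.toNat A 0 (by omega) (by exact_mod_cast hpre) (by omega),
    solveAltLoop_eq A.toNat A [] le_rfl]
  simp
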